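-- pv_equiv track=rewrite | github.com/elisha-chen/adventofcode2018 | adventday6.py | infinite
-- ===== SOURCE A (Python) =====
-- def distance(point, location):
--     return abs(point[0] - location[0]) + abs(point[1] - location[1])
--
-- def closest(point, location, coordinates):
--     for location2 in coordinates:
--         if (distance(point, location) >= distance(point, location2) and
--             location2 != location):
--             return False
--     return True
--
-- def infinite(coordinates):
--     new_locations = coordinates
--     x_max = max(coordinates)[0]
--     x_min = min(coordinates)[0]
--     x_mid = (x_max + x_min)//2
--     y_max = coordinates[0][1]
--     y_min = coordinates[0][1]
--
--     for location in coordinates: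
--         if (location[1] > y_max):
--             y_max = location[1]
--         elif (location[1] < y_min):
--             y_min = location[1]
--     y_mid = (y_max + y_min)//2
--
--     infinite = []
--
--     for x in range(x_min - x_mid, x_max + x_mid):
--         for location in coordinates:
--             if (closest((x, y_max), location, coordinates) and
--                 infinite.count(location) == 0):
--                 infinite.append(location)
--             elif (closest((x, y_min), location, coordinates) and
--                 infinite.count(location) == 0):
--                 infinite.append(location)
--     for y in range(y_min - y_mid, y_max + y_mid):
--         for location in coordinates:
--             if (closest((x_max, y), location, coordinates) and
--                 infinite.count(location) == 0):
--                 infinite.append(location)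
--             elif (closest((x_min, y), location, coordinates) and
--                 infinite.count(location) == 0):
--                 infinite.append(location)
--
--     return infinite
-- ===== SOURCE B (Python) =====
-- def infinite(coordinates):
--     xs = [c[0] for c in coordinates]
--     ys = [c[1] for c in coordinates]
--     x_max, x_min = max(xs), min(xs)
--     y_max, y_min = max(ys), min(ys)
--     x_mid = (x_max + x_min) // 2
--     y_mid = (y_max + y_min) // 2
--
--     def nearest(px, py):
--         # unique nearest coordinate of (px, py) in one pass, or None on a tie
--         best = None
--         bestd = 0
--         unique = True
--         for loc in coordinates:
--             d = abs(px - loc[0]) + abs(py - loc[1])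
--             if best is None or d < bestd:
--                 best, bestd, unique = loc, d, True
--             elif d == bestd and loc != best:
--                 unique = False
--         return best if unique else None
--
--     seen = set()
--     out = []
--
--     def emit(p, q):
--         a = nearest(*p)
--         b = nearest(*q)
--         # record, in input order, any coordinate that is the unique nearest
--         # of one of the two opposite border points
--         for loc in coordinates:
--             if (loc == a or loc == b) and loc not in seen:
--                 seen.add(loc)
--                 out.append(loc)
--
--     for x in range(x_min - x_mid, x_max + x_mid):
--         emit((x, y_max), (x, y_min))
--     for y in range(y_min - y_mid, y_max + y_mid):
--         emit((x_max, y), (x_min, y))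
--     return out
-- ===== Notes on version B (the rewrite author's own statement) =====
-- stated objective: faster
-- what changed: Instead of testing every coordinate against every other with closest() for each border point (and a linear count() for dedup), B computes the unique nearest coordinate of each pair of opposite border points in one pass and then records, in input order, the coordinates matching either nearest, with a set for the already-seen test.
-- outside the precondition, e.g. on infinite([]): A raises ValueError, B raises ValueError
import Mathlib
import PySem

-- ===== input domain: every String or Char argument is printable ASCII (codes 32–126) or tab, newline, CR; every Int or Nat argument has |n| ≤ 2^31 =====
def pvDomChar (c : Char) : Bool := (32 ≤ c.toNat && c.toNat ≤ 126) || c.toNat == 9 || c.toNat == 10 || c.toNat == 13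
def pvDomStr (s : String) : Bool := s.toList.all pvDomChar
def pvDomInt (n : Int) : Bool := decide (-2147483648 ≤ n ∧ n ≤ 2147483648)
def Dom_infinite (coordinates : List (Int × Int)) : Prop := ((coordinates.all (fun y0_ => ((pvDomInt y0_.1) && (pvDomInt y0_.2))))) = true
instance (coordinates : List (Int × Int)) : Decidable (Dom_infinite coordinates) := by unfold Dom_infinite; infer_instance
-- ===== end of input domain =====

-- B replaces A's quadratic inner scan (per border point, `closest` rescans all coordinates
-- for each coordinate) by a single pass computing the unique nearest coordinate per border
-- point, with a set for the dedup membership test; objective: faster (O(range·n) vs O(range·n²)).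

-- ===== PORT A =====
def pvDist (point location : Int × Int) : Int :=
  |point.1 - location.1| + |point.2 - location.2|

def pvClosest (point location : Int × Int) : List (Int × Int) → Bool
  | [] => true
  | location2 :: rest =>
      if pvDist point location ≥ pvDist point location2 ∧ location2 ≠ location then false
      else pvClosest point location rest

-- the body of A's inner `for location in coordinates` loop (first point checked, elif second)
def pvABody (p q : Int × Int) (cs : List (Int × Int)) (inf : List (Int × Int))
    (loc : Int × Int) : List (Int × Int) :=
  if pvClosest p loc cs = true ∧ PySem.List.count inf loc = 0 then inf ++ [loc]
  else if pvClosest q loc cs = true ∧ PySem.List.count inf loc = 0 then inf ++ [loc]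
  else inf

def infinite (coordinates : List (Int × Int)) : List (Int × Int) :=
  -- max(coordinates) / min(coordinates): lexicographic extrema of the tuples
  let x_max := ((PySem.List.max2? coordinates Prod.fst Prod.snd).getD (0, 0)).1
  let x_min := ((PySem.List.min2? coordinates Prod.fst Prod.snd).getD (0, 0)).1
  let x_mid := PySem.Int.floordiv (x_max + x_min) 2
  -- coordinates[0][1]  (total form; Pre_ excludes the empty list, where Python raises)
  let y0 := (PySem.List.pyGetD coordinates 0 (0, 0)).2
  let ymm := coordinates.foldl
      (fun (s : Int × Int) loc =>
        if loc.2 > s.1 then (loc.2, s.2)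
        else if loc.2 < s.2 then (s.1, loc.2)
        else s) (y0, y0)
  let y_max := ymm.1
  let y_min := ymm.2
  let y_mid := PySem.Int.floordiv (y_max + y_min) 2
  let inf1 := (PySem.List.pyRange (x_min - x_mid) (x_max + x_mid) 1).foldl
      (fun inf x => coordinates.foldl (pvABody (x, y_max) (x, y_min) coordinates) inf) []
  (PySem.List.pyRange (y_min - y_mid) (y_max + y_mid) 1).foldl
      (fun inf y => coordinates.foldl (pvABody (x_max, y) (x_min, y) coordinates) inf) inf1

-- ===== PORT B =====
-- one step of B's single `for loc in coordinates` pass in nearest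
def pvUCStep (px py : Int) (s : Option (Int × Int) × Int × Bool) (loc : Int × Int) :
    Option (Int × Int) × Int × Bool :=
  let d := |px - loc.1| + |py - loc.2|
  match s with
  | (none, _, _) => (some loc, d, true)
  | (some best, bestd, unique) =>
      if d < bestd then (some loc, d, true)
      else if d = bestd ∧ loc ≠ best then (some best, bestd, false)
      else (some best, bestd, unique)

def pvUniqueClosest (px py : Int) (cs : List (Int × Int)) : Option (Int × Int) :=
  let st := cs.foldl (pvUCStep px py) (none, 0, true)
  if st.2.2 then st.1 else none

-- B's emit: record, in input order, any coordinate that is the unique nearest of p1 or p2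
def pvEmit (cs : List (Int × Int)) (p1 p2 : Int × Int)
    (st : PySem.Set (Int × Int) × List (Int × Int)) :
    PySem.Set (Int × Int) × List (Int × Int) :=
  let a := pvUniqueClosest p1.1 p1.2 cs
  let b := pvUniqueClosest p2.1 p2.2 cs
  cs.foldl
    (fun st loc =>
      if (a = some loc ∨ b = some loc) ∧ ¬ (PySem.Set.contains st.1 loc = true)
      then (PySem.Set.add st.1 loc, st.2 ++ [loc]) else st) st

def infinite_alt (coordinates : List (Int × Int)) : List (Int × Int) :=
  let xs := coordinates.map Prod.fst
  let ys := coordinates.map Prod.snd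
  let x_max := (PySem.List.max? xs (fun v => v)).getD 0
  let x_min := (PySem.List.min? xs (fun v => v)).getD 0
  let y_max := (PySem.List.max? ys (fun v => v)).getD 0
  let y_min := (PySem.List.min? ys (fun v => v)).getD 0
  let x_mid := PySem.Int.floordiv (x_max + x_min) 2
  let y_mid := PySem.Int.floordiv (y_max + y_min) 2
  let st1 := (PySem.List.pyRange (x_min - x_mid) (x_max + x_mid) 1).foldl
      (fun st x => pvEmit coordinates (x, y_max) (x, y_min) st) (PySem.Set.empty, [])
  ((PySem.List.pyRange (y_min - y_mid) (y_max + y_mid) 1).foldl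
      (fun st y => pvEmit coordinates (x_max, y) (x_min, y) st) st1).2

-- ===== PRECONDITION & SPEC =====
-- Python A raises ValueError (max of an empty sequence) on []; B raises there too.
def Pre_infinite (coordinates : List (Int × Int)) : Prop := coordinates ≠ []
instance (coordinates : List (Int × Int)) : Decidable (Pre_infinite coordinates) := by
  unfold Pre_infinite; infer_instance

def pvWitness_infinite : (List (Int × Int)) := [(0, 0), (2, 3)]

def Spec_infinite (coordinates : List (Int × Int)) (out : List (Int × Int)) : Prop := out = infinite_alt coordinates
instance (coordinates : List (Int × Int)) (out : List (Int × Int)) : Decidable (Spec_infinite coordinates out) := by unfold Spec_infinite; infer_instance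

-- ===== CLAIM (what is proved, stated in full; the proofs are below) =====
def Claim_equal_infinite : Prop := ∀ (coordinates : List (Int × Int)), Dom_infinite coordinates → Pre_infinite coordinates → Spec_infinite coordinates (infinite coordinates)

-- ===== LEMMAS AND PROOFS =====

-- `closest` is: strictly nearer to the point than every other (distinct) coordinate
lemma pvClosest_iff (p loc : Int × Int) (l : List (Int × Int)) :
    pvClosest p loc l = true ↔ ∀ y ∈ l, y ≠ loc → pvDist p loc < pvDist p y := by
  induction l with
  | nil => simp [pvClosest]
  | cons a t ih =>
    by_cases h : pvDist p loc ≥ pvDist p a ∧ a ≠ loc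
    · simp only [pvClosest, if_pos h, List.forall_mem_cons]
      constructor
      · intro hf; cases hf
      · intro ⟨ha, _⟩; exact absurd (ha h.2) (by omega)
    · simp only [pvClosest, if_neg h, ih, List.forall_mem_cons]
      push Not at h
      constructor
      · intro ht; refine ⟨fun hne => ?_, ht⟩; by_contra hlt; exact hne (h (by omega))
      · intro ⟨_, ht⟩; exact ht

-- invariant of B's nearest fold
lemma pvUC_inv (px py : Int) (l : List (Int × Int)) : ∀ (m : Int × Int) (u : Bool),
    ∃ m', l.foldl (pvUCStep px py) (some m, pvDist (px, py) m, u)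
        = (some m', pvDist (px, py) m',
            ((u || decide (pvDist (px, py) m' < pvDist (px, py) m)) &&
              decide (∀ y ∈ l, y ≠ m' → pvDist (px, py) m' < pvDist (px, py) y)))
      ∧ (m' = m ∨ m' ∈ l)
      ∧ (m' = m ∨ pvDist (px, py) m' < pvDist (px, py) m)
      ∧ (∀ y ∈ l, pvDist (px, py) m' ≤ pvDist (px, py) y) := by
  induction l with
  | nil =>
    intro m u
    exact ⟨m, by simp, Or.inl rfl, Or.inl rfl, by simp⟩
  | cons a t ih =>
    intro m u
    have hda : |px - a.1| + |py - a.2| = pvDist (px, py) a := rfl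
    by_cases h1 : pvDist (px, py) a < pvDist (px, py) m
    · -- strict improvement: state becomes (some a, D a, true)
      have hstep : pvUCStep px py (some m, pvDist (px, py) m, u) a
          = (some a, pvDist (px, py) a, true) := by
        simp [pvUCStep, hda, if_pos h1]
      obtain ⟨m', he, hmem, hlt, hmin⟩ := ih a true
      have hm'a : pvDist (px, py) m' ≤ pvDist (px, py) a := by
        rcases hlt with rfl | h2 <;> omega
      refine ⟨m', ?_, Or.inr ?_, Or.inr (by omega), ?_⟩
      · rw [List.foldl_cons, hstep, he]
        have hX : decide (pvDist (px, py) m' < pvDist (px, py) m) = true :=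
          decide_eq_true (by omega)
        have hiff : (∀ y ∈ t, y ≠ m' → pvDist (px, py) m' < pvDist (px, py) y)
            ↔ (∀ y ∈ a :: t, y ≠ m' → pvDist (px, py) m' < pvDist (px, py) y) := by
          constructor
          · intro hf y hy hne
            rcases List.mem_cons.1 hy with rfl | hy'
            · rcases hlt with rfl | h2
              · exact absurd rfl hne
              · exact h2
            · exact hf y hy' hne
          · intro hf y hy hne; exact hf y (List.mem_cons_of_mem a hy) hne
        rw [show decide (∀ y ∈ t, y ≠ m' → pvDist (px, py) m' < pvDist (px, py) y) = decide (∀ y ∈ a :: t, y ≠ m' → pvDist (px, py) m' < pvDist (px, py) y) from decide_eq_decide.2 hiff]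
        simp [hX]
      · rcases hmem with rfl | h2
        · exact List.mem_cons_self
        · exact List.mem_cons_of_mem a h2
      · intro y hy
        rcases List.mem_cons.1 hy with rfl | hy'
        · exact hm'a
        · exact hmin y hy'
    · by_cases h2 : pvDist (px, py) a = pvDist (px, py) m ∧ a ≠ m
      · -- tie with a distinct value: unique becomes false
        have hstep : pvUCStep px py (some m, pvDist (px, py) m, u) a
            = (some m, pvDist (px, py) m, false) := by
          simp [pvUCStep, hda, if_neg h1, if_pos h2]
        obtain ⟨m', he, hmem, hlt, hmin⟩ := ih m false
        refine ⟨m', ?_, hmem.imp id (List.mem_cons_of_mem a), hlt, ?_⟩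
        · rw [List.foldl_cons, hstep, he]
          rcases hlt with rfl | h3
          · -- m' = m : both sides false
            have hfalse : decide (∀ y ∈ a :: t, y ≠ m' → pvDist (px, py) m' < pvDist (px, py) y)
                = false := by
              apply decide_eq_false
              intro hf
              have := hf a List.mem_cons_self h2.2
              omega
            simp [hfalse]
          · have hX : decide (pvDist (px, py) m' < pvDist (px, py) m) = true :=
              decide_eq_true h3
            have hiff : (∀ y ∈ t, y ≠ m' → pvDist (px, py) m' < pvDist (px, py) y)
                ↔ (∀ y ∈ a :: t, y ≠ m' → pvDist (px, py) m' < pvDist (px, py) y) := by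
              constructor
              · intro hf y hy hne
                rcases List.mem_cons.1 hy with rfl | hy'
                · omega
                · exact hf y hy' hne
              · intro hf y hy hne; exact hf y (List.mem_cons_of_mem a hy) hne
            rw [show decide (∀ y ∈ t, y ≠ m' → pvDist (px, py) m' < pvDist (px, py) y) = decide (∀ y ∈ a :: t, y ≠ m' → pvDist (px, py) m' < pvDist (px, py) y) from decide_eq_decide.2 hiff]
            simp [hX]
        · intro y hy
          rcases List.mem_cons.1 hy with rfl | hy'
          · rcases hlt with rfl | h3 <;> omega
          · exact hmin y hy'
      · -- no change
        have hstep : pvUCStep px py (some m, pvDist (px, py) m, u) a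
            = (some m, pvDist (px, py) m, u) := by
          simp [pvUCStep, hda, if_neg h1, if_neg h2]
        obtain ⟨m', he, hmem, hlt, hmin⟩ := ih m u
        have hma : pvDist (px, py) m ≤ pvDist (px, py) a := by
          rcases eq_or_ne a m with rfl | hne
          · omega
          · rcases not_and_or.1 h2 with h3 | h3
            · omega
            · exact absurd hne h3
        refine ⟨m', ?_, hmem.imp id (List.mem_cons_of_mem a), hlt, ?_⟩
        · rw [List.foldl_cons, hstep, he]
          have hiff : (∀ y ∈ t, y ≠ m' → pvDist (px, py) m' < pvDist (px, py) y)
              ↔ (∀ y ∈ a :: t, y ≠ m' → pvDist (px, py) m' < pvDist (px, py) y) := by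
            constructor
            · intro hf y hy hne
              rcases List.mem_cons.1 hy with rfl | hy'
              · rcases hlt with rfl | h3
                · rcases not_and_or.1 h2 with h3 | h3
                  · omega
                  · exact absurd (by simpa using h3) hne
                · omega
              · exact hf y hy' hne
            · intro hf y hy hne; exact hf y (List.mem_cons_of_mem a hy) hne
          rw [show decide (∀ y ∈ t, y ≠ m' → pvDist (px, py) m' < pvDist (px, py) y) = decide (∀ y ∈ a :: t, y ≠ m' → pvDist (px, py) m' < pvDist (px, py) y) from decide_eq_decide.2 hiff]
        · intro y hy
          rcases List.mem_cons.1 hy with rfl | hy'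
          · rcases hlt with rfl | h3 <;> omega
          · exact hmin y hy'

lemma pvUC_some_iff (px py : Int) (l : List (Int × Int)) (c : Int × Int) :
    pvUniqueClosest px py l = some c ↔
      c ∈ l ∧ ∀ y ∈ l, y ≠ c → pvDist (px, py) c < pvDist (px, py) y := by
  match l with
  | [] => simp [pvUniqueClosest]
  | a :: t =>
    have hstep : pvUCStep px py (none, 0, true) a = (some a, pvDist (px, py) a, true) := rfl
    obtain ⟨m', he, hmem, hlt, hmin⟩ := pvUC_inv px py t a true
    have hm'a : pvDist (px, py) m' ≤ pvDist (px, py) a := by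
      rcases hlt with rfl | h <;> omega
    have hmema : m' ∈ a :: t := by
      rcases hmem with rfl | h
      · exact List.mem_cons_self
      · exact List.mem_cons_of_mem a h
    simp only [pvUniqueClosest, List.foldl_cons, hstep, he, Bool.true_or, Bool.true_and]
    constructor
    · intro h
      split at h
      case isTrue hu =>
        simp only [Option.some.injEq] at h
        subst h
        have hF := of_decide_eq_true hu
        refine ⟨hmema, ?_⟩
        intro y hy hne
        rcases List.mem_cons.1 hy with rfl | hy'
        · rcases hlt with rfl | h2
          · exact absurd rfl hne
          · exact h2
        · exact hF y hy' hne
      case isFalse => exact absurd h (by simp)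
    · intro ⟨hc, hprop⟩
      have hcm : m' = c := by
        by_contra hne
        have h1 := hprop m' hmema hne
        have h2 : pvDist (px, py) m' ≤ pvDist (px, py) c := by
          rcases List.mem_cons.1 hc with rfl | hc'
          · exact hm'a
          · exact hmin c hc'
        omega
      subst hcm
      have hF : decide (∀ y ∈ t, y ≠ m' → pvDist (px, py) m' < pvDist (px, py) y) = true := by
        apply decide_eq_true
        intro y hy hne
        exact hprop y (List.mem_cons_of_mem a hy) hne
      simp [hF]

lemma pvClosest_iff_uc (p : Int × Int) (l : List (Int × Int)) {loc : Int × Int}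
    (h : loc ∈ l) : pvClosest p loc l = true ↔ pvUniqueClosest p.1 p.2 l = some loc := by
  rw [pvClosest_iff, pvUC_some_iff]
  obtain ⟨p1, p2⟩ := p
  simp [h]

lemma pvAdd_of_contains {s : List (Int × Int)} {a : Int × Int}
    (h : PySem.Set.contains s a = true) : PySem.Set.add s a = s := by
  simp [PySem.Set.contains] at h
  simp_all [PySem.Set.add, PySem.Set.contains]

-- A's loop body, as a conditional set-insertion
lemma pvABody_eq (p q : Int × Int) (cs inf : List (Int × Int)) (loc : Int × Int) :
    pvABody p q cs inf loc =
      if (pvClosest p loc cs || pvClosest q loc cs) = true then PySem.Set.add inf loc else inf := by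
  by_cases hm : loc ∈ inf
  · have h0 : ¬ List.count loc inf = 0 := by simp [List.count_eq_zero, hm]
    have hadd : PySem.Set.add inf loc = inf := by
      simp [PySem.Set.add, PySem.Set.contains, hm]
    simp [pvABody, PySem.List.count, h0, hadd]
  · have h0 : List.count loc inf = 0 := List.count_eq_zero.2 hm
    have hadd : PySem.Set.add inf loc = inf ++ [loc] := by
      simp [PySem.Set.add, PySem.Set.contains, hm]
    by_cases hp : pvClosest p loc cs = true
    · simp [pvABody, PySem.List.count, hp, h0, hadd]
    · by_cases hq : pvClosest q loc cs = true <;>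
        simp [pvABody, PySem.List.count, hp, hq, h0, hadd]

-- B's emit loop over any sublist of the coordinates, on a duplicated state,
-- is A's inner loop over that sublist, duplicated
lemma pvEmit_aux (p q : Int × Int) (cs : List (Int × Int)) :
    ∀ (l : List (Int × Int)), (∀ c ∈ l, c ∈ cs) → ∀ (o : List (Int × Int)),
    l.foldl
      (fun (st : PySem.Set (Int × Int) × List (Int × Int)) loc =>
        if (pvUniqueClosest p.1 p.2 cs = some loc ∨ pvUniqueClosest q.1 q.2 cs = some loc) ∧
            ¬ (PySem.Set.contains st.1 loc = true)
        then (PySem.Set.add st.1 loc, st.2 ++ [loc]) else st) (o, o)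
      = (l.foldl (pvABody p q cs) o, l.foldl (pvABody p q cs) o) := by
  intro l
  induction l with
  | nil => intro _ o; rfl
  | cons loc t ih =>
    intro hsub o
    have hmem : loc ∈ cs := hsub loc List.mem_cons_self
    have hcond : (pvUniqueClosest p.1 p.2 cs = some loc ∨ pvUniqueClosest q.1 q.2 cs = some loc)
        ↔ (pvClosest p loc cs || pvClosest q loc cs) = true := by
      rw [Bool.or_eq_true_iff, pvClosest_iff_uc p cs hmem, pvClosest_iff_uc q cs hmem]
    have hstep :
        (if (pvUniqueClosest p.1 p.2 cs = some loc ∨ pvUniqueClosest q.1 q.2 cs = some loc) ∧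
            ¬ (PySem.Set.contains (Prod.fst ((o, o) : PySem.Set (Int × Int) × List (Int × Int))) loc = true)
        then (PySem.Set.add o loc, o ++ [loc])
        else ((o, o) : PySem.Set (Int × Int) × List (Int × Int)))
        = (pvABody p q cs o loc, pvABody p q cs o loc) := by
      rw [pvABody_eq]
      by_cases hc : (pvClosest p loc cs || pvClosest q loc cs) = true
      · by_cases hin : PySem.Set.contains (o : PySem.Set (Int × Int)) loc = true
        · have hin' : loc ∈ o := by simpa [PySem.Set.contains] using hin
          rw [if_neg (by simp [hcond, hc, hin']), if_pos hc, pvAdd_of_contains hin]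
        · have hin' : loc ∉ o := by simpa [PySem.Set.contains] using hin
          have hadd : PySem.Set.add (o : PySem.Set (Int × Int)) loc = o ++ [loc] := by
            simp [PySem.Set.add, PySem.Set.contains, hin']
          rw [if_pos ⟨hcond.2 hc, hin⟩, if_pos hc, hadd]
      · rw [if_neg (by simp [hcond, hc]), if_neg hc]
    simp only [List.foldl_cons]
    rw [hstep]
    exact ih (fun c hc => hsub c (List.mem_cons_of_mem loc hc)) _

lemma pvEmit_step (cs : List (Int × Int)) (p q : Int × Int) (o : List (Int × Int)) :
    pvEmit cs p q (o, o) = (cs.foldl (pvABody p q cs) o, cs.foldl (pvABody p q cs) o) :=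
  pvEmit_aux p q cs cs (fun _ hc => hc) o

-- a fold whose step duplicates a one-sided fold keeps the state duplicated
lemma pvPairFold {α : Type} (f : List (Int × Int) → α → List (Int × Int))
    (g : PySem.Set (Int × Int) × List (Int × Int) → α → PySem.Set (Int × Int) × List (Int × Int))
    (h : ∀ o x, g (o, o) x = (f o x, f o x)) :
    ∀ (l : List α) (o : List (Int × Int)), l.foldl g (o, o) = (l.foldl f o, l.foldl f o) := by
  intro l
  induction l with
  | nil => intro o; rfl
  | cons x r ih => intro o; simp only [List.foldl_cons, h]; exact ih _

-- extrema agreement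
lemma pvMax2_cons_cons (c x : Int × Int) (r : List (Int × Int)) :
    PySem.List.max2? (c :: x :: r) Prod.fst Prod.snd
      = PySem.List.max2?
          ((if c.1 < x.1 ∨ (c.1 ≤ x.1 ∧ c.2 < x.2) then x else c) :: r) Prod.fst Prod.snd := by
  simp [PySem.List.max2?, apply_ite]

lemma pvMax2_single (c : Int × Int) :
    PySem.List.max2? [c] Prod.fst Prod.snd = some c := by
  simp [PySem.List.max2?]

lemma pvMax2_spec : ∀ (t : List (Int × Int)) (c : Int × Int),
    ∃ m, PySem.List.max2? (c :: t) Prod.fst Prod.snd = some m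
      ∧ (m = c ∨ m ∈ t) ∧ c.1 ≤ m.1 ∧ ∀ y ∈ t, y.1 ≤ m.1 := by
  intro t
  induction t with
  | nil => intro c; exact ⟨c, pvMax2_single c, Or.inl rfl, le_refl _, by simp⟩
  | cons x r ih =>
    intro c
    rw [pvMax2_cons_cons]
    by_cases h : c.1 < x.1 ∨ (c.1 ≤ x.1 ∧ c.2 < x.2)
    · rw [if_pos h]
      obtain ⟨m, he, hmem, hle, hmax⟩ := ih x
      refine ⟨m, he, ?_, by omega, ?_⟩
      · rcases hmem with rfl | hm
        · exact Or.inr List.mem_cons_self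
        · exact Or.inr (List.mem_cons_of_mem x hm)
      · intro y hy
        rcases List.mem_cons.1 hy with rfl | hy'
        · omega
        · exact hmax y hy'
    · rw [if_neg h]
      obtain ⟨m, he, hmem, hle, hmax⟩ := ih c
      have hxc : x.1 ≤ c.1 := by
        rcases le_or_gt x.1 c.1 with h1 | h1
        · exact h1
        · exact absurd (Or.inl h1) h
      refine ⟨m, he, ?_, hle, ?_⟩
      · rcases hmem with rfl | hm
        · exact Or.inl rfl
        · exact Or.inr (List.mem_cons_of_mem x hm)
      · intro y hy
        rcases List.mem_cons.1 hy with rfl | hy'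
        · omega
        · exact hmax y hy'

lemma pvMax2_fst {c : Int × Int} {t : List (Int × Int)} :
    ((PySem.List.max2? (c :: t) Prod.fst Prod.snd).getD (0, 0)).1 =
      (PySem.List.max? ((c :: t).map Prod.fst) (fun v => v)).getD 0 := by
  obtain ⟨m, he, hmem, hle, hmax⟩ := pvMax2_spec t c
  rw [he, List.map_cons, PySem.List.max?_id_cons]
  simp only [Option.getD_some]
  have hb := PySem.List.le_foldl_max (t.map Prod.fst) c.1
  have h1 : m.1 ≤ (t.map Prod.fst).foldl max c.1 := by
    rcases hmem with rfl | hm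
    · exact hb.1
    · exact hb.2 m.1 (List.mem_map_of_mem hm)
  have h2 : (t.map Prod.fst).foldl max c.1 ≤ m.1 := by
    rcases PySem.List.foldl_max_mem (t.map Prod.fst) c.1 with h | h
    · omega
    · obtain ⟨y, hy, hyv⟩ := List.mem_map.1 h
      have := hmax y hy
      omega
  omega

lemma pvMin2_cons_cons (c x : Int × Int) (r : List (Int × Int)) :
    PySem.List.min2? (c :: x :: r) Prod.fst Prod.snd
      = PySem.List.min2?
          ((if x.1 < c.1 ∨ (x.1 ≤ c.1 ∧ x.2 < c.2) then x else c) :: r) Prod.fst Prod.snd := by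
  simp [PySem.List.min2?, apply_ite]

lemma pvMin2_single (c : Int × Int) :
    PySem.List.min2? [c] Prod.fst Prod.snd = some c := by
  simp [PySem.List.min2?]

lemma pvMin2_spec : ∀ (t : List (Int × Int)) (c : Int × Int),
    ∃ m, PySem.List.min2? (c :: t) Prod.fst Prod.snd = some m
      ∧ (m = c ∨ m ∈ t) ∧ m.1 ≤ c.1 ∧ ∀ y ∈ t, m.1 ≤ y.1 := by
  intro t
  induction t with
  | nil => intro c; exact ⟨c, pvMin2_single c, Or.inl rfl, le_refl _, by simp⟩
  | cons x r ih =>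
    intro c
    rw [pvMin2_cons_cons]
    by_cases h : x.1 < c.1 ∨ (x.1 ≤ c.1 ∧ x.2 < c.2)
    · rw [if_pos h]
      obtain ⟨m, he, hmem, hle, hmin⟩ := ih x
      have hxc : x.1 ≤ c.1 := by
        rcases h with h1 | h1
        · omega
        · exact h1.1
      refine ⟨m, he, ?_, by omega, ?_⟩
      · rcases hmem with rfl | hm
        · exact Or.inr List.mem_cons_self
        · exact Or.inr (List.mem_cons_of_mem x hm)
      · intro y hy
        rcases List.mem_cons.1 hy with rfl | hy'
        · omega
        · exact hmin y hy'
    · rw [if_neg h]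
      obtain ⟨m, he, hmem, hle, hmin⟩ := ih c
      have hcx : c.1 ≤ x.1 := by
        rcases le_or_gt c.1 x.1 with h1 | h1
        · exact h1
        · exact absurd (Or.inl h1) h
      refine ⟨m, he, ?_, hle, ?_⟩
      · rcases hmem with rfl | hm
        · exact Or.inl rfl
        · exact Or.inr (List.mem_cons_of_mem x hm)
      · intro y hy
        rcases List.mem_cons.1 hy with rfl | hy'
        · omega
        · exact hmin y hy'

lemma pvMin2_fst {c : Int × Int} {t : List (Int × Int)} :
    ((PySem.List.min2? (c :: t) Prod.fst Prod.snd).getD (0, 0)).1 =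
      (PySem.List.min? ((c :: t).map Prod.fst) (fun v => v)).getD 0 := by
  obtain ⟨m, he, hmem, hle, hmin⟩ := pvMin2_spec t c
  rw [he, List.map_cons, PySem.List.min?_id_cons]
  simp only [Option.getD_some]
  have hb := PySem.List.foldl_min_le (t.map Prod.fst) c.1
  have h1 : (t.map Prod.fst).foldl min c.1 ≤ m.1 := by
    rcases hmem with rfl | hm
    · exact hb.1
    · exact hb.2 m.1 (List.mem_map_of_mem hm)
  have h2 : m.1 ≤ (t.map Prod.fst).foldl min c.1 := by
    rcases PySem.List.foldl_min_mem (t.map Prod.fst) c.1 with h | h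
    · omega
    · obtain ⟨y, hy, hyv⟩ := List.mem_map.1 h
      have := hmin y hy
      omega
  omega

lemma pvYFold : ∀ (l : List (Int × Int)) (a b : Int), b ≤ a →
    l.foldl (fun (s : Int × Int) loc =>
        if loc.2 > s.1 then (loc.2, s.2)
        else if loc.2 < s.2 then (s.1, loc.2)
        else s) (a, b)
      = ((l.map Prod.snd).foldl max a, (l.map Prod.snd).foldl min b) := by
  intro l
  induction l with
  | nil => intro a b _; rfl
  | cons c t ih =>
    intro a b hba
    simp only [List.foldl_cons, List.map_cons]
    by_cases h1 : c.2 > a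
    · rw [if_pos h1, ih c.2 b (by omega)]
      congr 2
      · omega
      · omega
    · rw [if_neg h1]
      by_cases h2 : c.2 < b
      · rw [if_pos h2, ih a c.2 (by omega)]
        congr 2
        · omega
        · omega
      · rw [if_neg h2, ih a b hba]
        congr 2
        · omega
        · omega

-- the two sequential border sweeps, A-shape vs B-shape
lemma pvPhases (cs : List (Int × Int)) (r1 r2 : List Int) (yM ym xM xm : Int) :
    (r2.foldl (fun st y => pvEmit cs (xM, y) (xm, y) st)
      (r1.foldl (fun st x => pvEmit cs (x, yM) (x, ym) st) (PySem.Set.empty, []))).2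
    = r2.foldl (fun inf y => List.foldl (pvABody (xM, y) (xm, y) cs) inf cs)
        (r1.foldl (fun inf x => List.foldl (pvABody (x, yM) (x, ym) cs) inf cs) []) := by
  have h1 := pvPairFold (fun inf x => List.foldl (pvABody (x, yM) (x, ym) cs) inf cs)
      (fun st x => pvEmit cs (x, yM) (x, ym) st)
      (fun o x => pvEmit_step cs (x, yM) (x, ym) o) r1 []
  have h2 := pvPairFold (fun inf y => List.foldl (pvABody (xM, y) (xm, y) cs) inf cs)
      (fun st y => pvEmit cs (xM, y) (xm, y) st)
      (fun o y => pvEmit_step cs (xM, y) (xm, y) o) r2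
      (r1.foldl (fun inf x => List.foldl (pvABody (x, yM) (x, ym) cs) inf cs) [])
  rw [show (PySem.Set.empty : PySem.Set (Int × Int)) = ([] : List (Int × Int)) from rfl, h1, h2]

-- ===== VERDICT (by name: the statement is the Claim_ definition above) =====
theorem infinite_spec : Claim_equal_infinite := by
  intro coordinates _ hpre
  unfold Spec_infinite
  obtain ⟨c, t, rfl⟩ := List.exists_cons_of_ne_nil hpre
  have hgA : (PySem.List.pyGetD (c :: t) 0 ((0 : Int), (0 : Int))).2 = c.2 := by simp [pysem]
  have hyA := pvYFold (c :: t) c.2 c.2 le_rfl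
  have hyM : ((c :: t).map Prod.snd).foldl max c.2
      = (PySem.List.max? ((c :: t).map Prod.snd) (fun v => v)).getD 0 := by
    rw [List.map_cons, PySem.List.max?_id_cons]
    simp [List.foldl_cons]
  have hym : ((c :: t).map Prod.snd).foldl min c.2
      = (PySem.List.min? ((c :: t).map Prod.snd) (fun v => v)).getD 0 := by
    rw [List.map_cons, PySem.List.min?_id_cons]
    simp [List.foldl_cons]
  simp only [infinite, infinite_alt]
  rw [pvMax2_fst, pvMin2_fst, hgA, hyA]
  dsimp only
  rw [hyM, hym]
  exact (pvPhases (c :: t) _ _ _ _ _ _).symm
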